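-- pv_equiv track=rewrite | github.com/T-Python-Feb-24/LAB_FUNCTIONS | bounce .py | function_2
-- ===== SOURCE A (Python) =====
-- def function_2(num):
--     '''
--     Prints a countdown pattern starting from the entered positive number.
--     Rewrite the function so that it returns the pattern as a string, then assign the result to a variables and print it.
--     '''
--
--     pattern = ""
--     for i in range(num, 0, -1):
--         line = ""
--         for j in range(i, 0, -1):
--             line += str(j) + " "
--         pattern += line.strip() + "\n"
--     return pattern
-- ===== SOURCE B (Python) =====
-- def function_2(num):
--     nums = [str(j) for j in range(num, 0, -1)]
--     return ''.join(' '.join(nums[-i:]) + '\n' for i in range(num, 0, -1))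
-- ===== Notes on version B (the rewrite author's own statement) =====
-- stated objective: simpler
-- what changed: Builds the descending number strings once and emits each line as a space-joined suffix slice of that table, instead of A's nested loop re-deriving and re-concatenating every number per line followed by a strip of the trailing space.
import Mathlib
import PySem

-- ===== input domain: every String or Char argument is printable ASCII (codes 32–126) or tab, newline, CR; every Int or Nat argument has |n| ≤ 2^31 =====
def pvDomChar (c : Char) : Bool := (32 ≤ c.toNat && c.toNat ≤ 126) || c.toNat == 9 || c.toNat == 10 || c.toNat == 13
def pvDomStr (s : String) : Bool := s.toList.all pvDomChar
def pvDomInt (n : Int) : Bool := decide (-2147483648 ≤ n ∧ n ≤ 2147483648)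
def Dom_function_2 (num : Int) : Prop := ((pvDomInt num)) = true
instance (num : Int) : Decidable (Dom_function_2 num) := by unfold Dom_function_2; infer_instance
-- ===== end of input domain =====

-- B builds the descending number strings once and emits each line as a space-joined suffix slice,
-- replacing A's nested per-line re-stringification/concatenation plus strip; same output (simpler decomposition).

-- ===== PORT A =====
def function_2 (num : Int) : String :=
  (PySem.List.pyRange num 0 (-1)).foldl (fun pattern i =>
    pattern ++ (PySem.Str.strip ((PySem.List.pyRange i 0 (-1)).foldl
      (fun line j => line ++ (PySem.Int.toStr j ++ " ")) "") ++ "\n")) ""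

-- ===== PORT B =====
def function_2_alt (num : Int) : String :=
  let nums := (PySem.List.pyRange num 0 (-1)).map PySem.Int.toStr
  PySem.Str.join "" ((PySem.List.pyRange num 0 (-1)).map (fun i =>
    PySem.Str.join " " (PySem.List.slice nums (some (-i)) none) ++ "\n"))

-- ===== PRECONDITION & SPEC =====
def Spec_function_2 (num : Int) (out : String) : Prop := out = function_2_alt num
instance (num : Int) (out : String) : Decidable (Spec_function_2 num out) := by unfold Spec_function_2; infer_instance

-- ===== CLAIM (what is proved, stated in full; the proofs are below) =====
def Claim_equal_function_2 : Prop := ∀ (num : Int), Dom_function_2 num → Spec_function_2 num (function_2 num)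

-- ===== LEMMAS AND PROOFS =====

theorem pv_toList_empty : ("" : String).toList = [] := rfl
theorem pv_toList_space : (" " : String).toList = [' '] := rfl
theorem pv_toList_nl : ("\n" : String).toList = ['\n'] := rfl

set_option maxHeartbeats 1600000 in
theorem pv_isspace_digitChar (m : Nat) : PySem.Chars.isspace (Nat.digitChar m) = false := by
  rcases Nat.lt_or_ge m 16 with h | h
  · interval_cases m <;> decide
  · unfold Nat.digitChar
    rw [if_neg (show ¬(m = 0) by omega), if_neg (show ¬(m = 1) by omega),
        if_neg (show ¬(m = 2) by omega), if_neg (show ¬(m = 3) by omega),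
        if_neg (show ¬(m = 4) by omega), if_neg (show ¬(m = 5) by omega),
        if_neg (show ¬(m = 6) by omega), if_neg (show ¬(m = 7) by omega),
        if_neg (show ¬(m = 8) by omega), if_neg (show ¬(m = 9) by omega),
        if_neg (show ¬(m = 10) by omega), if_neg (show ¬(m = 11) by omega),
        if_neg (show ¬(m = 12) by omega), if_neg (show ¬(m = 13) by omega),
        if_neg (show ¬(m = 14) by omega), if_neg (show ¬(m = 15) by omega)]
    decide

theorem pv_mem_toDigitsCore (b : Nat) :
    ∀ (fuel n : Nat) (ds : List Char) (c : Char), c ∈ Nat.toDigitsCore b fuel n ds →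
      c ∈ ds ∨ ∃ m, c = Nat.digitChar m := by
  intro fuel
  induction fuel with
  | zero => intro n ds c hc; exact Or.inl hc
  | succ fuel ih =>
    intro n ds c hc
    rw [Nat.toDigitsCore] at hc
    by_cases h : n / b = 0
    · simp only [h, if_true] at hc
      rcases List.mem_cons.mp hc with h1 | h1
      · exact Or.inr ⟨n % b, h1⟩
      · exact Or.inl h1
    · simp only [h, if_false] at hc
      rcases ih (n / b) (Nat.digitChar (n % b) :: ds) c hc with h1 | h1
      · rcases List.mem_cons.mp h1 with h2 | h2
        · exact Or.inr ⟨n % b, h2⟩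
        · exact Or.inl h2
      · exact Or.inr h1

theorem pv_toDigitsCore_ne_nil (b : Nat) :
    ∀ (fuel n : Nat) (ds : List Char), fuel ≠ 0 ∨ ds ≠ [] → Nat.toDigitsCore b fuel n ds ≠ [] := by
  intro fuel
  induction fuel with
  | zero =>
    intro n ds h
    rcases h with h | h
    · exact absurd rfl h
    · simpa [Nat.toDigitsCore] using h
  | succ fuel ih =>
    intro n ds _
    rw [Nat.toDigitsCore]
    by_cases h : n / b = 0
    · simp [h]
    · simp only [h, if_false]
      exact ih (n / b) (Nat.digitChar (n % b) :: ds) (Or.inr (by simp))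

theorem pv_toChars_ne_nil (j : Int) : PySem.Int.toChars j ≠ [] := by
  unfold PySem.Int.toChars
  split_ifs
  · simp
  · exact pv_toDigitsCore_ne_nil 10 (j.toNat + 1) j.toNat [] (Or.inl (by omega))

theorem pv_isspace_toChars (j : Int) : ∀ c ∈ PySem.Int.toChars j, PySem.Chars.isspace c = false := by
  intro c hc
  unfold PySem.Int.toChars at hc
  split_ifs at hc
  · rcases List.mem_cons.mp hc with h | h
    · subst h; decide
    · rcases pv_mem_toDigitsCore 10 _ _ _ _ h with h1 | ⟨m, rfl⟩
      · simp at h1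
      · exact pv_isspace_digitChar m
  · rcases pv_mem_toDigitsCore 10 _ _ _ _ hc with h1 | ⟨m, rfl⟩
    · simp at h1
    · exact pv_isspace_digitChar m

theorem pv_dropWhile_of_nospace (l : List Char)
    (h : ∀ c ∈ l, PySem.Chars.isspace c = false) :
    l.dropWhile PySem.Chars.isspace = l := by
  cases l with
  | nil => rfl
  | cons c t => rw [List.dropWhile_cons, h c (by simp)]; simp

theorem pv_ic_cons2 (sep p q : List Char) (ps : List (List Char)) :
    sep.intercalate (p :: q :: ps) = p ++ sep ++ sep.intercalate (q :: ps) := by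
  simp [List.intercalate, List.intersperse]

theorem pv_ic_singleton (sep p : List Char) : sep.intercalate [p] = p := by
  simp [List.intercalate]

theorem pv_join_nil_eq_flatten (l : List (List Char)) :
    List.intercalate ([] : List Char) l = l.flatten := by
  induction l with
  | nil => simp [List.intercalate]
  | cons p t ih =>
    cases t with
    | nil => simp [pv_ic_singleton]
    | cons q r => rw [pv_ic_cons2, ih]; simp

theorem pv_flat_ic (p : List Char) (ps : List (List Char)) :
    ((p :: ps).map (fun x => x ++ [' '])).flatten = [' '].intercalate (p :: ps) ++ [' '] := by
  induction ps generalizing p with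
  | nil => simp [pv_ic_singleton]
  | cons q r ih =>
    rw [List.map_cons, List.flatten_cons, ih q, pv_ic_cons2]
    simp

theorem pv_ic_eq_append (p : List Char) (ps : List (List Char)) :
    ∃ tl, [' '].intercalate (p :: ps) = p ++ tl := by
  cases ps with
  | nil => exact ⟨[], by simp [pv_ic_singleton]⟩
  | cons q r => exact ⟨[' '] ++ [' '].intercalate (q :: r), by rw [pv_ic_cons2]; simp⟩

theorem pv_ic_ne_nil (p : List Char) (ps : List (List Char)) (hp : p ≠ []) :
    [' '].intercalate (p :: ps) ≠ [] := by
  obtain ⟨tl, htl⟩ := pv_ic_eq_append p ps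
  rw [htl]
  simp [hp]

theorem pv_rstrip_ic (ps : List (List Char))
    (h : ∀ p ∈ ps, p ≠ [] ∧ ∀ c ∈ p, PySem.Chars.isspace c = false) :
    ([' '].intercalate ps).reverse.dropWhile PySem.Chars.isspace = ([' '].intercalate ps).reverse := by
  induction ps with
  | nil => simp [List.intercalate]
  | cons p t ih =>
    cases t with
    | nil =>
      rw [pv_ic_singleton]
      exact pv_dropWhile_of_nospace _ (fun c hc => (h p (by simp)).2 c (List.mem_reverse.mp hc))
    | cons q r =>
      have hI := ih (fun x hx => h x (List.mem_cons_of_mem p hx))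
      have hIne : [' '].intercalate (q :: r) ≠ [] := pv_ic_ne_nil q r (h q (by simp)).1
      rw [pv_ic_cons2]
      simp only [List.reverse_append]
      rw [List.dropWhile_append, hI]
      rw [show (([' '].intercalate (q :: r)).reverse.isEmpty) = false by
        simp [hIne]]
      simp

theorem pv_strip_line (ps : List (List Char)) (hne : ps ≠ [])
    (h : ∀ p ∈ ps, p ≠ [] ∧ ∀ c ∈ p, PySem.Chars.isspace c = false) :
    PySem.Chars.strip ((ps.map (fun x => x ++ [' '])).flatten) = [' '].intercalate ps := by
  cases ps with
  | nil => exact absurd rfl hne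
  | cons p t =>
    rw [pv_flat_ic]
    obtain ⟨tl, htl⟩ := pv_ic_eq_append p t
    have hp := h p (by simp)
    obtain ⟨c, p', hps⟩ : ∃ c p', p = c :: p' := by
      cases p with
      | nil => exact absurd rfl hp.1
      | cons c p' => exact ⟨c, p', rfl⟩
    have hc : PySem.Chars.isspace c = false := hp.2 c (by rw [hps]; simp)
    unfold PySem.Chars.strip PySem.Chars.lstrip PySem.Chars.rstrip
    have h1 : List.dropWhile PySem.Chars.isspace ([' '].intercalate (p :: t) ++ [' '])
        = [' '].intercalate (p :: t) ++ [' '] := by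
      rw [htl, hps]
      rw [show ((c :: p') ++ tl) ++ [' '] = c :: (p' ++ tl ++ [' ']) by simp]
      rw [List.dropWhile_cons, hc]
      simp
    rw [h1]
    rw [List.reverse_append]
    rw [show ([' '] : List Char).reverse = [' '] from rfl]
    rw [show (([' '] : List Char) ++ ([' '].intercalate (p :: t)).reverse)
        = ' ' :: ([' '].intercalate (p :: t)).reverse from rfl]
    rw [List.dropWhile_cons]
    rw [show PySem.Chars.isspace ' ' = true from by decide]
    rw [if_pos rfl]
    rw [pv_rstrip_ic (p :: t) h, List.reverse_reverse]

theorem pv_foldl_toList {α : Type} (l : List α) (f : α → String) (s : String) :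
    (l.foldl (fun acc x => acc ++ f x) s).toList
      = s.toList ++ (l.map (fun x => (f x).toList)).flatten := by
  induction l generalizing s with
  | nil => simp
  | cons a t ih => simp [ih, List.append_assoc]

theorem pv_dropR (k : Nat) : ∀ (a : Int), (k : Int) ≤ a →
    (PySem.List.pyRange a 0 (-1)).drop k = PySem.List.pyRange (a - k) 0 (-1) := by
  induction k with
  | zero => intro a _; simp
  | succ k ih =>
    intro a ha
    have h0 : (0 : Int) < a := by omega
    rw [PySem.List.pyRange_neg_one_cons h0, List.drop_succ_cons, ih (a - 1) (by omega)]
    congr 1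
    push_cast
    ring

theorem pv_R_ne_nil (i : Int) (hi : 0 < i) : PySem.List.pyRange i 0 (-1) ≠ [] := by
  rw [PySem.List.pyRange_neg_one_cons hi]
  simp

theorem pv_line_eq (i : Int) (hi : 0 < i) :
    PySem.Chars.strip ((List.foldl (fun line j => line ++ (PySem.Int.toStr j ++ " ")) ""
        (PySem.List.pyRange i 0 (-1))).toList)
      = [' '].intercalate ((PySem.List.pyRange i 0 (-1)).map PySem.Int.toChars) := by
  rw [pv_foldl_toList]
  rw [pv_toList_empty, List.nil_append]
  have hmap : (PySem.List.pyRange i 0 (-1)).map (fun x => (PySem.Int.toStr x ++ " ").toList)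
      = ((PySem.List.pyRange i 0 (-1)).map PySem.Int.toChars).map (fun x => x ++ [' ']) := by
    rw [List.map_map]
    apply List.map_congr_left
    intro j _
    simp [PySem.Int.toList_toStr, pv_toList_space]
  rw [hmap]
  exact pv_strip_line _ (by simp [pv_R_ne_nil i hi]) (by
    intro p hp
    obtain ⟨j, _, rfl⟩ := List.mem_map.mp hp
    exact ⟨pv_toChars_ne_nil j, pv_isspace_toChars j⟩)

theorem pv_slice_eq (num i : Int) (hi : 0 < i) (hin : i ≤ num) :
    PySem.List.slice ((PySem.List.pyRange num 0 (-1)).map PySem.Int.toStr) (some (-i)) none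
      = (PySem.List.pyRange i 0 (-1)).map PySem.Int.toStr := by
  rw [show -i = -((i.toNat : Nat) : Int) by omega]
  rw [PySem.List.slice_from_neg_natCast _ i.toNat (show 0 < i.toNat by omega)]
  rw [show ((PySem.List.pyRange num 0 (-1)).map PySem.Int.toStr).length = num.toNat by
    simp [PySem.List.length_pyRange_neg_one]]
  rw [← List.map_drop]
  rw [pv_dropR (num.toNat - i.toNat) num (by omega)]
  rw [show num - ((num.toNat - i.toNat : Nat) : Int) = i by omega]

-- ===== VERDICT (by name: the statement is the Claim_ definition above) =====
theorem function_2_spec : Claim_equal_function_2 := by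
  intro num _
  unfold Spec_function_2 function_2 function_2_alt
  apply String.ext
  show (String.toList _) = (String.toList _)
  rw [pv_foldl_toList]
  simp only [PySem.Str.toList_join, String.toList_append, PySem.Str.toList_strip,
    List.map_map, Function.comp_def, PySem.Chars.join, pv_toList_empty, pv_toList_space,
    pv_toList_nl, List.nil_append]
  rw [pv_join_nil_eq_flatten]
  refine congrArg List.flatten ?_
  apply List.map_congr_left
  intro i hi
  have hmem := (PySem.List.mem_pyRange_neg_one).mp hi
  rw [pv_slice_eq num i hmem.1 hmem.2]
  rw [pv_line_eq i hmem.1]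
  simp only [List.map_map, Function.comp_def, PySem.Int.toList_toStr]
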